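-- pv_equiv track=rewrite | github.com/TimHung000/hackerRank | Algo/Sortings/Fraudulent_Activity_Notifications/main.py | findLimit
-- ===== SOURCE A (Python) =====
-- def findLimit(bucket, d):
--     idx1 = (d + 1) // 2
--     idx2 = d // 2 + 1
--     prevCount = 0
--     curCount = 0
--     for exp in range(len(bucket)):
--         prevCount = curCount
--         curCount += bucket[exp]
--         if idx1 > prevCount and idx1 <= curCount:
--             median1 = exp
--         if idx2 > prevCount and idx2 <= curCount:
--             median2 = exp
--             break
--     return median1 + median2
-- ===== SOURCE B (Python) =====
-- def findLimit(bucket, d):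
--     # Build the prefix-sum array once, then locate the two median buckets by
--     # two independent index searches over it: a forward search for the first
--     # bucket containing item idx2, then a backward search from there for the
--     # last bucket (at or before it) containing item idx1.
--     prefix = []
--     total = 0
--     for v in bucket:
--         total += v
--         prefix.append(total)
--
--     def at_(i):
--         return prefix[i - 1] if i else 0
--
--     idx1 = (d + 1) // 2
--     idx2 = d // 2 + 1
--     n = len(prefix)
--
--     i2 = 0
--     while i2 < n and not (at_(i2) < idx2 <= prefix[i2]):
--         i2 += 1
--
--     i1 = i2
--     while i1 >= 0 and not (at_(i1) < idx1 <= prefix[i1]):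
--         i1 -= 1
--
--     return i1 + i2
-- ===== Notes on version B (the rewrite author's own statement) =====
-- stated objective: alternative
-- what changed: B materializes the prefix-sum array once and then runs two independent index searches over it (a forward search for the bucket holding item d//2+1, then a backward search from that point for the bucket holding item (d+1)//2), replacing A's single fused loop that accumulates running counts while conditionally rebinding both medians and breaking early.
import Mathlib
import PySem

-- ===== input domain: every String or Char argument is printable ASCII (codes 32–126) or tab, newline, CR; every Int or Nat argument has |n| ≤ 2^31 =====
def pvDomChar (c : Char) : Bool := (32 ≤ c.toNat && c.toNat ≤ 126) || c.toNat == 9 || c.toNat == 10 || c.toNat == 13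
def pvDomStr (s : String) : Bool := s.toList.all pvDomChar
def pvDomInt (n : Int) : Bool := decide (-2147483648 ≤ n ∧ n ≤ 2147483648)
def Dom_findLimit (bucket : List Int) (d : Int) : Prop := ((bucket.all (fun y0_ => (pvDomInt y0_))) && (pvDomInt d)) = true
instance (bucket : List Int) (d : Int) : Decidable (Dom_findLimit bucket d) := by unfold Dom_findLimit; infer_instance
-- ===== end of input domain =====

-- B builds the prefix-sum array once and locates the two median buckets by two independent
-- index searches over it (forward for median2, backward from there for median1), replacing
-- A's fused accumulate-overwrite-break loop (objective: alternative).


-- ===== PORT A =====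
-- A's for-loop over range(len(bucket)) with running prevCount/curCount, the
-- conditionally-assigned median1/median2 (Option models "not yet bound") and the break.
def goA (idx1 idx2 : Int) (l : List Int) (exp : Nat) (cur : Int)
    (m1 m2 : Option Int) : Option Int × Option Int :=
  match l with
  | [] => (m1, m2)
  | v :: rest =>
    let prev := cur
    let cur' := cur + v
    let m1' := if prev < idx1 ∧ idx1 ≤ cur' then some (Int.ofNat exp) else m1
    if prev < idx2 ∧ idx2 ≤ cur' then (m1', some (Int.ofNat exp))
    else goA idx1 idx2 rest (exp + 1) cur' m1' m2

def findLimit (bucket : List Int) (d : Int) : Int :=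
  let idx1 := PySem.Int.floordiv (d + 1) 2
  let idx2 := PySem.Int.floordiv d 2 + 1
  let r := goA idx1 idx2 bucket 0 0 none none
  -- Python raises UnboundLocalError when a median is unbound; Pre_ excludes that, 0 is junk.
  r.1.getD 0 + r.2.getD 0

-- ===== PORT B =====
-- the prefix-sum array, built in one pass
def prefixSums (l : List Int) (acc : Int) : List Int :=
  match l with
  | [] => []
  | v :: rest => (acc + v) :: prefixSums rest (acc + v)

-- Source B's test "at_(i) < x <= prefix[i]"; indices are in range inside Pre_, so getD is exact
def crossAtN (p : List Int) (x : Int) (i : Nat) : Bool :=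
  decide ((if i = 0 then (0 : Int) else p.getD (i - 1) 0) < x) && decide (x ≤ p.getD i 0)

-- Source B's forward while loop, on structural fuel (never exhausted: i rises to n in ≤ n steps)
def fwdB (p : List Int) (x : Int) : Nat → Nat → Nat
  | 0, i => i
  | f + 1, i => if i < p.length ∧ crossAtN p x i = false then fwdB p x f (i + 1) else i

-- Source B's backward while loop (i may reach -1, so it is an Int), on structural fuel
def bwdB (p : List Int) (x : Int) : Nat → Int → Int
  | 0, i => i
  | f + 1, i => if 0 ≤ i ∧ crossAtN p x i.toNat = false then bwdB p x f (i - 1) else i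

def findLimit_alt (bucket : List Int) (d : Int) : Int :=
  let p := prefixSums bucket 0
  let idx1 := PySem.Int.floordiv (d + 1) 2
  let idx2 := PySem.Int.floordiv d 2 + 1
  let i2 := fwdB p idx2 p.length 0
  let i1 := bwdB p idx1 (i2 + 1) (Int.ofNat i2)
  i1 + Int.ofNat i2

-- ===== PRECONDITION & SPEC =====
-- "bucket number i holds the x-th item of the histogram" (prefix-sum window test)
def crossQ (bucket : List Int) (x : Int) (k : Nat) : Bool :=
  decide ((bucket.take k).sum < x) && decide (x ≤ (bucket.take (k + 1)).sum)

-- Exactly the inputs on which Python A returns normally: some bucket i is the FIRST one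
-- holding item d//2+1 (A's break point), and some bucket j ≤ i holds item (d+1)//2; on
-- every other input A raises UnboundLocalError (median1 or median2 never bound).
def Pre_findLimit (bucket : List Int) (d : Int) : Prop :=
  ∃ i ∈ List.range bucket.length,
    crossQ bucket (PySem.Int.floordiv d 2 + 1) i = true ∧
    (∀ k ∈ List.range i, crossQ bucket (PySem.Int.floordiv d 2 + 1) k = false) ∧
    ∃ j ∈ List.range (i + 1), crossQ bucket (PySem.Int.floordiv (d + 1) 2) j = true
instance (bucket : List Int) (d : Int) : Decidable (Pre_findLimit bucket d) := by
  unfold Pre_findLimit; infer_instance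

def pvWitness_findLimit : List Int × Int := ([1, 0, 2, 3], 4)

def Spec_findLimit (bucket : List Int) (d : Int) (out : Int) : Prop := out = findLimit_alt bucket d
instance (bucket : List Int) (d : Int) (out : Int) : Decidable (Spec_findLimit bucket d out) := by
  unfold Spec_findLimit; infer_instance

-- ===== CLAIM (what is proved, stated in full; the proofs are below) =====
def Claim_equal_findLimit : Prop := ∀ (bucket : List Int) (d : Int), Dom_findLimit bucket d → Pre_findLimit bucket d → Spec_findLimit bucket d (findLimit bucket d)

-- ===== LEMMAS AND PROOFS =====

-- crossQ as a Prop over prefix sums with a general base (for induction)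
def crossP (x c : Int) (l : List Int) (k : Nat) : Prop :=
  c + (l.take k).sum < x ∧ x ≤ c + (l.take (k + 1)).sum

theorem crossQ_iff (bucket : List Int) (x : Int) (k : Nat) :
    crossQ bucket x k = true ↔ crossP x 0 bucket k := by
  simp [crossQ, crossP]

theorem crossP_shift (x c v : Int) (r : List Int) (m : Nat) :
    crossP x c (v :: r) (m + 1) ↔ crossP x (c + v) r m := by
  simp [crossP, List.take_succ_cons]
  constructor <;> (intro h; constructor <;> omega)

theorem crossP_zero (x c v : Int) (r : List Int) :
    crossP x c (v :: r) 0 ↔ (c < x ∧ x ≤ c + v) := by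
  simp [crossP, List.take_succ_cons]

theorem crossP_lt_length (x c : Int) (l : List Int) (k : Nat) (h : crossP x c l k) :
    k < l.length := by
  by_contra hk
  obtain ⟨h1, h2⟩ := h
  rw [List.take_of_length_le (by omega)] at h1
  rw [List.take_of_length_le (by omega)] at h2
  omega

-- the first index whose bucket holds item x (A's break point), scanning a suffix
def firstCross (x : Int) (cur : Int) : List Int → Option Nat
  | [] => none
  | v :: r => if cur < x ∧ x ≤ cur + v then some 0 else (firstCross x (cur + v) r).map (· + 1)

-- the last index ≤ k whose bucket holds item x (A's last overwrite of median1)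
def lastUpTo (x : Int) (cur : Int) : List Int → Nat → Option Nat
  | [], _ => none
  | v :: r, 0 => if cur < x ∧ x ≤ cur + v then some 0 else none
  | v :: r, k + 1 =>
    match lastUpTo x (cur + v) r k with
    | some j => some (j + 1)
    | none => if cur < x ∧ x ≤ cur + v then some 0 else none

theorem firstCross_of (x : Int) :
    ∀ (l : List Int) (c : Int) (i : Nat), crossP x c l i →
      (∀ k, k < i → ¬ crossP x c l k) → firstCross x c l = some i := by
  intro l
  induction l with
  | nil => intro c i h _; exact absurd (crossP_lt_length x c [] i h) (by simp)
  | cons v r ih =>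
    intro c i h hfirst
    match i with
    | 0 =>
      have := (crossP_zero x c v r).mp h
      simp [firstCross, this]
    | i + 1 =>
      have h0 : ¬ (c < x ∧ x ≤ c + v) := fun hc =>
        hfirst 0 (by omega) ((crossP_zero x c v r).mpr hc)
      rw [firstCross, if_neg h0,
        ih (c + v) i ((crossP_shift x c v r i).mp h)
          (fun k hk => fun hc => hfirst (k + 1) (by omega) ((crossP_shift x c v r k).mpr hc))]
      rfl

theorem lastUpTo_none (x : Int) :
    ∀ (l : List Int) (c : Int) (k : Nat),
      (∀ m, m ≤ k → ¬ crossP x c l m) → lastUpTo x c l k = none := by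
  intro l
  induction l with
  | nil => intro c k _; rfl
  | cons v r ih =>
    intro c k hno
    match k with
    | 0 =>
      have h0 : ¬ (c < x ∧ x ≤ c + v) := fun hc =>
        hno 0 (le_refl 0) ((crossP_zero x c v r).mpr hc)
      simp [lastUpTo, h0]
    | k + 1 =>
      have h0 : ¬ (c < x ∧ x ≤ c + v) := fun hc =>
        hno 0 (by omega) ((crossP_zero x c v r).mpr hc)
      rw [lastUpTo, ih (c + v) k
        (fun m hm => fun hc => hno (m + 1) (by omega) ((crossP_shift x c v r m).mpr hc))]
      simp [h0]

theorem lastUpTo_of (x : Int) :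
    ∀ (l : List Int) (c : Int) (k j : Nat), j ≤ k → crossP x c l j →
      (∀ m, j < m → m ≤ k → ¬ crossP x c l m) → lastUpTo x c l k = some j := by
  intro l
  induction l with
  | nil => intro c k j _ h _; exact absurd (crossP_lt_length x c [] j h) (by simp)
  | cons v r ih =>
    intro c k j hjk h hmax
    match k with
    | 0 =>
      have hj0 : j = 0 := by omega
      subst hj0
      have := (crossP_zero x c v r).mp h
      simp [lastUpTo, this]
    | k + 1 =>
      match j with
      | 0 =>
        have hnone : lastUpTo x (c + v) r k = none :=
          lastUpTo_none x r (c + v) k (fun m hm => fun hc =>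
            hmax (m + 1) (by omega) (by omega) ((crossP_shift x c v r m).mpr hc))
        have := (crossP_zero x c v r).mp h
        rw [lastUpTo, hnone]
        simp [this]
      | j + 1 =>
        have hsome : lastUpTo x (c + v) r k = some j :=
          ih (c + v) k j (by omega) ((crossP_shift x c v r j).mp h)
            (fun m h1 h2 => fun hc => hmax (m + 1) (by omega) (by omega)
              ((crossP_shift x c v r m).mpr hc))
        rw [lastUpTo, hsome]

-- characterisation of A's loop: it returns the break point for idx2 and the last
-- overwrite (up to the break point) for idx1, or the carried m1 if there was none
theorem goA_char (idx1 idx2 : Int) :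
    ∀ (l : List Int) (exp : Nat) (cur : Int) (m1 m2 : Option Int) (i2 : Nat),
      firstCross idx2 cur l = some i2 →
      goA idx1 idx2 l exp cur m1 m2 =
        ((match lastUpTo idx1 cur l i2 with
          | some j => some (Int.ofNat (exp + j))
          | none => m1), some (Int.ofNat (exp + i2))) := by
  intro l
  induction l with
  | nil => intro exp cur m1 m2 i2 h; exact absurd h (by simp [firstCross])
  | cons v r ih =>
    intro exp cur m1 m2 i2 h
    rw [firstCross] at h
    by_cases hc2 : cur < idx2 ∧ idx2 ≤ cur + v
    · rw [if_pos hc2] at h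
      have hi2 : i2 = 0 := by simpa using h.symm
      subst hi2
      rw [goA]
      simp only [if_pos hc2]
      by_cases hc1 : cur < idx1 ∧ idx1 ≤ cur + v
      · simp [lastUpTo, hc1]
      · simp [lastUpTo, hc1]
    · rw [if_neg hc2] at h
      match hr : firstCross idx2 (cur + v) r with
      | none => rw [hr] at h; exact absurd h (by simp)
      | some i2' =>
        rw [hr] at h
        have hi2 : i2 = i2' + 1 := by simpa using h.symm
        subst hi2
        rw [goA]
        simp only [if_neg hc2]
        rw [ih (exp + 1) (cur + v) _ m2 i2' hr, lastUpTo]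
        cases hl : lastUpTo idx1 (cur + v) r i2' with
        | some j =>
          simp only [Prod.mk.injEq, Option.some.injEq]
          exact ⟨congrArg Int.ofNat (by omega), congrArg Int.ofNat (by omega)⟩
        | none =>
          by_cases hc1 : cur < idx1 ∧ idx1 ≤ cur + v
          · simp only [if_pos hc1, Prod.mk.injEq, Option.some.injEq]
            exact ⟨congrArg Int.ofNat (by omega), congrArg Int.ofNat (by omega)⟩
          · simp only [if_neg hc1, Prod.mk.injEq, Option.some.injEq]
            exact ⟨trivial, congrArg Int.ofNat (by omega)⟩

-- bridge: entries of the prefix-sum array are sums of take-prefixes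
theorem prefixSums_getD (l : List Int) :
    ∀ (c : Int) (i : Nat), i < l.length →
      (prefixSums l c).getD i 0 = c + (l.take (i + 1)).sum := by
  induction l with
  | nil => intro c i h; simp at h
  | cons v r ih =>
    intro c i h
    match i with
    | 0 => simp [prefixSums, List.take_succ_cons]
    | i + 1 =>
      rw [prefixSums]
      have : (((c + v) :: prefixSums r (c + v)).getD (i + 1) 0) =
          (prefixSums r (c + v)).getD i 0 := rfl
      rw [this, ih (c + v) i (by simpa using h), List.take_succ_cons]
      simp [add_assoc]

theorem prefixSums_length (l : List Int) (acc : Int) :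
    (prefixSums l acc).length = l.length := by
  induction l generalizing acc with
  | nil => rfl
  | cons v r ih => simp [prefixSums, ih]

theorem crossAtN_iff (bucket : List Int) (x : Int) (i : Nat) (h : i < bucket.length) :
    crossAtN (prefixSums bucket 0) x i = true ↔ crossP x 0 bucket i := by
  unfold crossAtN crossP
  match i with
  | 0 =>
    rw [if_pos rfl, prefixSums_getD bucket 0 0 h]
    simp
  | i + 1 =>
    rw [if_neg (by omega), prefixSums_getD bucket 0 (i + 1) h,
      show i + 1 - 1 = i from rfl, prefixSums_getD bucket 0 i (by omega)]
    simp

-- Source B's forward search reaches exactly the first crossing index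
theorem fwdB_char (p : List Int) (x : Int) (i2 : Nat) (hi2 : i2 < p.length)
    (hc : crossAtN p x i2 = true) (hfirst : ∀ k, k < i2 → crossAtN p x k = false) :
    ∀ (f i : Nat), i ≤ i2 → i2 - i ≤ f → fwdB p x f i = i2 := by
  intro f
  induction f with
  | zero => intro i h1 h2; rw [fwdB]; omega
  | succ f ih =>
    intro i h1 h2
    rw [fwdB]
    by_cases he : i = i2
    · subst he
      rw [if_neg (by simp [hc])]
    · rw [if_pos ⟨by omega, hfirst i (by omega)⟩]
      exact ih (i + 1) (by omega) (by omega)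

-- Source B's backward search reaches exactly the last crossing index ≤ its start
theorem bwdB_char (p : List Int) (x : Int) (j : Nat)
    (hc : crossAtN p x j = true) :
    ∀ (f i : Nat), j ≤ i → i - j ≤ f →
      (∀ m, j < m → m ≤ i → crossAtN p x m = false) →
      bwdB p x f (i : Int) = (j : Int) := by
  intro f
  induction f with
  | zero =>
    intro i h1 h2 _
    rw [bwdB]
    congr 1
    omega
  | succ f ih =>
    intro i h1 h2 hmax
    rw [bwdB]
    by_cases he : i = j
    · subst he
      have ht : ((i : Int)).toNat = i := by omega
      rw [if_neg (by simp [ht, hc])]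
    · have hm := hmax i (by omega) (le_refl i)
      have ht : ((i : Int)).toNat = i := by omega
      rw [if_pos ⟨by omega, by simp [ht, hm]⟩]
      have h1' : (i : Int) - 1 = ((i - 1 : Nat) : Int) := by omega
      rw [h1']
      exact ih (i - 1) (by omega) (by omega) (fun m ha hb => hmax m ha (by omega))

-- ===== VERDICT (by name: the statement is the Claim_ definition above) =====
theorem findLimit_spec : Claim_equal_findLimit := by
  intro bucket d _ hpre
  obtain ⟨i2, hi2mem, hc2, hfirst, j, hjmem, hc1⟩ := hpre
  rw [List.mem_range] at hi2mem
  rw [List.mem_range] at hjmem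
  unfold Spec_findLimit findLimit findLimit_alt
  -- the greatest crossing index for idx1 at or before the break point
  set idx1 := PySem.Int.floordiv (d + 1) 2 with hidx1
  set idx2 := PySem.Int.floordiv d 2 + 1 with hidx2
  obtain ⟨jstar, hPj, hjle, hmax⟩ :
      ∃ js : Nat, crossQ bucket idx1 js = true ∧ js ≤ i2 ∧
        ∀ m, js < m → m ≤ i2 → ¬ (crossQ bucket idx1 m = true) :=
    ⟨Nat.findGreatest (fun m => crossQ bucket idx1 m = true) i2,
     Nat.findGreatest_spec (P := fun m => crossQ bucket idx1 m = true) (by omega : j ≤ i2) hc1,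
     Nat.findGreatest_le i2,
     fun m h1 h2 => Nat.findGreatest_is_greatest (P := fun m => crossQ bucket idx1 m = true) h1 h2⟩
  have hjlen : jstar < bucket.length :=
    crossP_lt_length idx1 0 bucket jstar ((crossQ_iff bucket idx1 jstar).mp hPj)
  -- A's side
  have hfc : firstCross idx2 0 bucket = some i2 :=
    firstCross_of idx2 bucket 0 i2 ((crossQ_iff bucket idx2 i2).mp hc2)
      (fun k hk => fun hcp => by
        have := hfirst k (List.mem_range.mpr hk)
        rw [(crossQ_iff bucket idx2 k).mpr hcp] at this
        exact absurd this (by simp))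
  have hlu : lastUpTo idx1 0 bucket i2 = some jstar :=
    lastUpTo_of idx1 bucket 0 i2 jstar hjle ((crossQ_iff bucket idx1 jstar).mp hPj)
      (fun m h1 h2 => fun hcp => hmax m h1 h2 ((crossQ_iff bucket idx1 m).mpr hcp))
  have hA := goA_char idx1 idx2 bucket 0 0 none none i2 hfc
  rw [hlu] at hA
  -- B's side
  have hplen : (prefixSums bucket 0).length = bucket.length := prefixSums_length bucket 0
  have hcB2 : crossAtN (prefixSums bucket 0) idx2 i2 = true :=
    (crossAtN_iff bucket idx2 i2 hi2mem).mpr ((crossQ_iff bucket idx2 i2).mp hc2)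
  have hcB1 : crossAtN (prefixSums bucket 0) idx1 jstar = true :=
    (crossAtN_iff bucket idx1 jstar hjlen).mpr ((crossQ_iff bucket idx1 jstar).mp hPj)
  have hfwd : fwdB (prefixSums bucket 0) idx2 (prefixSums bucket 0).length 0 = i2 :=
    fwdB_char (prefixSums bucket 0) idx2 i2 (by omega) hcB2
      (fun k hk => by
        have hkl : k < bucket.length := by omega
        have := hfirst k (List.mem_range.mpr hk)
        by_contra hne
        have ht : crossAtN (prefixSums bucket 0) idx2 k = true := by
          cases hx : crossAtN (prefixSums bucket 0) idx2 k
          · exact absurd hx hne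
          · rfl
        rw [(crossQ_iff bucket idx2 k).mpr
          ((crossAtN_iff bucket idx2 k hkl).mp ht)] at this
        exact absurd this (by simp))
      (prefixSums bucket 0).length 0 (by omega) (by omega)
  have hbwd : bwdB (prefixSums bucket 0) idx1 (i2 + 1) ((i2 : Nat) : Int) = ((jstar : Nat) : Int) :=
    bwdB_char (prefixSums bucket 0) idx1 jstar hcB1 (i2 + 1) i2 hjle (by omega)
      (fun m h1 h2 => by
        have hml : m < bucket.length := by omega
        by_contra hne
        have ht : crossAtN (prefixSums bucket 0) idx1 m = true := by
          cases hx : crossAtN (prefixSums bucket 0) idx1 m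
          · exact absurd hx hne
          · rfl
        exact hmax m h1 h2 ((crossQ_iff bucket idx1 m).mpr
          ((crossAtN_iff bucket idx1 m hml).mp ht)))
  simp only [Int.ofNat_eq_natCast, hA, hfwd, hbwd, Option.getD_some]
  omega
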